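-- pv_equiv track=rewrite | github.com/LuisRV16/Knapsack-Problem | ils_solver.py | busqueda_local
-- ===== SOURCE A (Python) =====
-- def evaluar(solucion, valores, pesos, capacidad):
--     valor_total = sum(valores[i] for i in range(len(solucion)) if solucion[i] == 1)
--     peso_total = sum(pesos[i] for i in range(len(solucion)) if solucion[i] == 1)
--     return valor_total if peso_total <= capacidad else 0  # Penalización si excede la capacidad
--
-- def busqueda_local(solucion, valores, pesos, capacidad):
--     mejor_sol = solucion[:]
--     mejor_valor = evaluar(mejor_sol, valores, pesos, capacidad)
--
--     for i in range(len(solucion)):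
--         nueva_sol = solucion[:]
--         nueva_sol[i] = 1 - nueva_sol[i]  # Intercambia 0 ↔ 1
--
--         if sum(pesos[j] for j in range(len(solucion)) if nueva_sol[j] == 1) <= capacidad:
--             nuevo_valor = evaluar(nueva_sol, valores, pesos, capacidad)
--             if nuevo_valor > mejor_valor:
--                 mejor_sol, mejor_valor = nueva_sol, nuevo_valor
--
--     return mejor_sol
-- ===== SOURCE B (Python) =====
-- def busqueda_local(solucion, valores, pesos, capacidad):
--     n = len(solucion)
--     base_v = 0
--     base_w = 0
--     for i in range(n):
--         if solucion[i] == 1: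
--             base_v += valores[i]
--             base_w += pesos[i]
--     mejor_valor = base_v if base_w <= capacidad else 0
--     best = None
--     for i in range(n):
--         s = solucion[i]
--         if s == 1:
--             w, v = base_w - pesos[i], base_v - valores[i]
--         elif s == 0:
--             w, v = base_w + pesos[i], base_v + valores[i]
--         else:
--             w, v = base_w, base_v
--         if w <= capacidad and v > mejor_valor:
--             best, mejor_valor = i, v
--     if best is None:
--         return solucion[:]
--     res = solucion[:]
--     res[best] = 1 - res[best]
--     return res
-- ===== Notes on version B (the rewrite author's own statement) =====
-- stated objective: faster
-- what changed: B precomputes the base weight/value of the current solution once and evaluates each 1-flip incrementally in O(1), tracking only the best flip index, instead of A's per-flip list copy and O(n) re-summations.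
-- outside the precondition, e.g. on busqueda_local([0], [], [7], 0): A returns [0], B raises IndexError
import Mathlib
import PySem

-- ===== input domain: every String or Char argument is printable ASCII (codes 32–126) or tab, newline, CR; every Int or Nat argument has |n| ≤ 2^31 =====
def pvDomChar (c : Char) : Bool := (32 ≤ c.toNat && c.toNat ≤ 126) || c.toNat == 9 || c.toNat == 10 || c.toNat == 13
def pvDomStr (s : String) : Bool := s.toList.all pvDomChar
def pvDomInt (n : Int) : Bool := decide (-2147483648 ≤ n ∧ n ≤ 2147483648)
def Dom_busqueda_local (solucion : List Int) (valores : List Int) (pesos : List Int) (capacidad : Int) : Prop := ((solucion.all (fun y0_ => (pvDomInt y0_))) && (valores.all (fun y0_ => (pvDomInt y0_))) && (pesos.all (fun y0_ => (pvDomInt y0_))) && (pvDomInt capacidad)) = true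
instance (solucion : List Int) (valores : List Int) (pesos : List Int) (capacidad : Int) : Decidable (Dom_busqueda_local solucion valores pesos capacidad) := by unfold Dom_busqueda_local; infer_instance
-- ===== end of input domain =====

-- B replaces A's per-flip list copy and O(n) re-summations by one precomputed base weight/value
-- and O(1) incremental evaluation of each flip, tracking only the best flip index (objective: faster).

-- ===== PORT A =====
-- sum(xs[i] for i in range(len(sol)) if sol[i] == 1); indices are in range under Pre_
def pvSumIf (sol xs : List Int) : Int :=
  (List.range sol.length).foldl
    (fun acc i => if sol.getD i 0 = 1 then acc + xs.getD i 0 else acc) 0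

def pvEvaluar (solucion valores pesos : List Int) (capacidad : Int) : Int :=
  let valor_total := pvSumIf solucion valores
  let peso_total := pvSumIf solucion pesos
  if peso_total ≤ capacidad then valor_total else 0

def busqueda_local (solucion : List Int) (valores : List Int) (pesos : List Int) (capacidad : Int) : List Int :=
  let st := (List.range solucion.length).foldl
    (fun (st : List Int × Int) i =>
      let nueva := solucion.set i (1 - solucion.getD i 0)
      if pvSumIf nueva pesos ≤ capacidad then
        let nuevo := pvEvaluar nueva valores pesos capacidad
        if nuevo > st.2 then (nueva, nuevo) else st
      else st)
    (solucion, pvEvaluar solucion valores pesos capacidad)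
  st.1

-- ===== PORT B =====
def busqueda_local_alt (solucion : List Int) (valores : List Int) (pesos : List Int) (capacidad : Int) : List Int :=
  let base := (List.range solucion.length).foldl
    (fun (p : Int × Int) i =>
      if solucion.getD i 0 = 1 then (p.1 + valores.getD i 0, p.2 + pesos.getD i 0) else p)
    (0, 0)
  let mejor0 : Int := if base.2 ≤ capacidad then base.1 else 0
  let st := (List.range solucion.length).foldl
    (fun (st : Option Nat × Int) i =>
      let s := solucion.getD i 0
      let wv : Int × Int :=
        if s = 1 then (base.2 - pesos.getD i 0, base.1 - valores.getD i 0)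
        else if s = 0 then (base.2 + pesos.getD i 0, base.1 + valores.getD i 0)
        else (base.2, base.1)
      if wv.1 ≤ capacidad ∧ wv.2 > st.2 then (some i, wv.2) else st)
    (none, mejor0)
  match st.1 with
  | none => solucion
  | some i => solucion.set i (1 - solucion.getD i 0)

-- ===== PRECONDITION & SPEC =====
-- Pre_ excludes inputs where some position holding a 0/1 bit has no value or weight (valores or
-- pesos too short): there B raises IndexError, and A raises too except when the flip is infeasible.
def Pre_busqueda_local (solucion : List Int) (valores : List Int) (pesos : List Int) (capacidad : Int) : Prop :=
  ∀ i ∈ List.range solucion.length,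
    (solucion.getD i 0 = 0 ∨ solucion.getD i 0 = 1) → (i < valores.length ∧ i < pesos.length)

instance (solucion : List Int) (valores : List Int) (pesos : List Int) (capacidad : Int) : Decidable (Pre_busqueda_local solucion valores pesos capacidad) := by unfold Pre_busqueda_local; infer_instance

def pvWitness_busqueda_local : List Int × List Int × List Int × Int := ([1, 0], [3, 4], [2, 5], 6)

def Spec_busqueda_local (solucion : List Int) (valores : List Int) (pesos : List Int) (capacidad : Int) (out : List Int) : Prop := out = busqueda_local_alt solucion valores pesos capacidad
instance (solucion : List Int) (valores : List Int) (pesos : List Int) (capacidad : Int) (out : List Int) : Decidable (Spec_busqueda_local solucion valores pesos capacidad out) := by unfold Spec_busqueda_local; infer_instance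

-- ===== CLAIM (what is proved, stated in full; the proofs are below) =====
def Claim_equal_busqueda_local : Prop := ∀ (solucion : List Int) (valores : List Int) (pesos : List Int) (capacidad : Int), Dom_busqueda_local solucion valores pesos capacidad → Pre_busqueda_local solucion valores pesos capacidad → Spec_busqueda_local solucion valores pesos capacidad (busqueda_local solucion valores pesos capacidad)

-- ===== LEMMAS AND PROOFS =====

-- the solution B's state (best flip index so far) denotes
def pvRepr (sol : List Int) (b : Option Nat) : List Int :=
  match b with
  | none => sol
  | some i => sol.set i (1 - sol.getD i 0)

-- A's loop body, named for the proofs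
def pvStepA (solucion valores pesos : List Int) (capacidad : Int)
    (st : List Int × Int) (i : Nat) : List Int × Int :=
  let nueva := solucion.set i (1 - solucion.getD i 0)
  if pvSumIf nueva pesos ≤ capacidad then
    let nuevo := pvEvaluar nueva valores pesos capacidad
    if nuevo > st.2 then (nueva, nuevo) else st
  else st

-- B's loop body with the base pair written as the sums it computes
def pvStepB (solucion valores pesos : List Int) (capacidad : Int)
    (st : Option Nat × Int) (i : Nat) : Option Nat × Int :=
  let s := solucion.getD i 0
  let wv : Int × Int :=
    if s = 1 then (pvSumIf solucion pesos - pesos.getD i 0,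
                   pvSumIf solucion valores - valores.getD i 0)
    else if s = 0 then (pvSumIf solucion pesos + pesos.getD i 0,
                        pvSumIf solucion valores + valores.getD i 0)
    else (pvSumIf solucion pesos, pvSumIf solucion valores)
  if wv.1 ≤ capacidad ∧ wv.2 > st.2 then (some i, wv.2) else st

theorem pv_fold_pair (sol val pes : List Int) (l : List Nat) (p : Int × Int) :
    l.foldl (fun (p : Int × Int) i =>
        if sol.getD i 0 = 1 then (p.1 + val.getD i 0, p.2 + pes.getD i 0) else p) p
      = (l.foldl (fun acc i => if sol.getD i 0 = 1 then acc + val.getD i 0 else acc) p.1,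
         l.foldl (fun acc i => if sol.getD i 0 = 1 then acc + pes.getD i 0 else acc) p.2) := by
  induction l generalizing p with
  | nil => rfl
  | cons j t ih =>
    rw [List.foldl_cons, List.foldl_cons, List.foldl_cons]
    by_cases h : sol.getD j 0 = 1
    · rw [if_pos h, if_pos h, if_pos h, ih]
    · rw [if_neg h, if_neg h, if_neg h, ih]

theorem pv_base (solucion valores pesos : List Int) :
    (List.range solucion.length).foldl
      (fun (p : Int × Int) i =>
        if solucion.getD i 0 = 1 then (p.1 + valores.getD i 0, p.2 + pesos.getD i 0) else p)
      (0, 0)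
    = (pvSumIf solucion valores, pvSumIf solucion pesos) := by
  rw [pv_fold_pair]; rfl

theorem pvA_eq (solucion valores pesos : List Int) (capacidad : Int) :
    busqueda_local solucion valores pesos capacidad
      = ((List.range solucion.length).foldl (pvStepA solucion valores pesos capacidad)
          (solucion, pvEvaluar solucion valores pesos capacidad)).1 := rfl

theorem pvB_eq (solucion valores pesos : List Int) (capacidad : Int) :
    busqueda_local_alt solucion valores pesos capacidad
      = (match ((List.range solucion.length).foldl (pvStepB solucion valores pesos capacidad)
            (none, if pvSumIf solucion pesos ≤ capacidad then pvSumIf solucion valores else 0)).1 with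
         | none => solucion
         | some i => solucion.set i (1 - solucion.getD i 0)) := by
  unfold busqueda_local_alt
  rw [pv_base]
  rfl

theorem pv_fold_sum (sol xs : List Int) (l : List Nat) (a : Int) :
    l.foldl (fun acc i => if sol.getD i 0 = 1 then acc + xs.getD i 0 else acc) a
      = a + (l.map (fun i => if sol.getD i 0 = 1 then xs.getD i 0 else 0)).sum := by
  induction l generalizing a with
  | nil => simp
  | cons j t ih =>
    rw [List.foldl_cons, List.map_cons, List.sum_cons, ih]
    by_cases h : sol.getD j 0 = 1
    · rw [if_pos h, if_pos h]; ring
    · rw [if_neg h, if_neg h]; ring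

theorem pv_map_sum_set (g g' : Nat → Int) (i n : Nat) (hi : i < n)
    (h : ∀ j, j ≠ i → g' j = g j) :
    ((List.range n).map g').sum = ((List.range n).map g).sum + g' i - g i := by
  induction n with
  | zero => omega
  | succ n ih =>
    rw [List.range_succ]
    simp only [List.map_append, List.sum_append, List.map_cons, List.map_nil,
      List.sum_cons, List.sum_nil]
    by_cases hin : i = n
    · subst hin
      have hmap : (List.range i).map g' = (List.range i).map g := by
        apply List.map_congr_left
        intro j hj
        exact h j (by simp only [List.mem_range] at hj; omega)
      rw [hmap]; ring
    · rw [ih (by omega), h n (by omega)]; ring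

theorem pv_sumIf_set (sol xs : List Int) (i : Nat) (v : Int) (hi : i < sol.length) :
    pvSumIf (sol.set i v) xs
      = pvSumIf sol xs + (if v = 1 then xs.getD i 0 else 0)
        - (if sol.getD i 0 = 1 then xs.getD i 0 else 0) := by
  unfold pvSumIf
  rw [List.length_set, pv_fold_sum, pv_fold_sum,
    pv_map_sum_set (fun j => if sol.getD j 0 = 1 then xs.getD j 0 else 0)
      (fun j => if (sol.set i v).getD j 0 = 1 then xs.getD j 0 else 0) i sol.length hi
      (fun j hj => by simp [List.getD_eq_getElem?_getD, Ne.symm hj])]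
  have hv : (sol.set i v).getD i 0 = v := by
    simp [List.getD_eq_getElem?_getD, hi]
  rw [hv]
  ring

theorem pv_step (solucion valores pesos : List Int) (capacidad : Int) (i : Nat)
    (hi : i < solucion.length) (vA : Int) (b : Option Nat) :
    pvStepA solucion valores pesos capacidad (pvRepr solucion b, vA) i
      = (pvRepr solucion (pvStepB solucion valores pesos capacidad (b, vA) i).1,
         (pvStepB solucion valores pesos capacidad (b, vA) i).2) := by
  by_cases h1 : solucion.getD i 0 = 1
  · -- item i is in the solution: the flip removes it
    have hw' : pvSumIf (solucion.set i (1 - solucion.getD i 0)) pesos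
        = pvSumIf solucion pesos - pesos.getD i 0 := by
      rw [pv_sumIf_set _ _ _ _ hi, if_pos h1, if_neg (by omega : ¬(1 - solucion.getD i 0 = 1))]
      ring
    have hv' : pvSumIf (solucion.set i (1 - solucion.getD i 0)) valores
        = pvSumIf solucion valores - valores.getD i 0 := by
      rw [pv_sumIf_set _ _ _ _ hi, if_pos h1, if_neg (by omega : ¬(1 - solucion.getD i 0 = 1))]
      ring
    simp only [pvStepA, pvStepB, pvEvaluar]
    rw [hw', hv', if_pos h1]
    simp only []
    by_cases hg : pvSumIf solucion pesos - pesos.getD i 0 ≤ capacidad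
    · rw [if_pos hg, if_pos hg]
      by_cases hgt : pvSumIf solucion valores - valores.getD i 0 > vA
      · rw [if_pos hgt, if_pos (And.intro hg hgt)]; rfl
      · rw [if_neg hgt, if_neg (fun hc => hgt hc.2)]
    · rw [if_neg hg, if_neg (fun hc => hg hc.1)]
  · by_cases h0 : solucion.getD i 0 = 0
    · -- item i is out of the solution: the flip adds it
      have hw' : pvSumIf (solucion.set i (1 - solucion.getD i 0)) pesos
          = pvSumIf solucion pesos + pesos.getD i 0 := by
        rw [pv_sumIf_set _ _ _ _ hi, if_neg h1, if_pos (by omega : 1 - solucion.getD i 0 = 1)]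
        ring
      have hv' : pvSumIf (solucion.set i (1 - solucion.getD i 0)) valores
          = pvSumIf solucion valores + valores.getD i 0 := by
        rw [pv_sumIf_set _ _ _ _ hi, if_neg h1, if_pos (by omega : 1 - solucion.getD i 0 = 1)]
        ring
      simp only [pvStepA, pvStepB, pvEvaluar]
      rw [hw', hv', if_neg h1, if_pos h0]
      simp only []
      by_cases hg : pvSumIf solucion pesos + pesos.getD i 0 ≤ capacidad
      · rw [if_pos hg, if_pos hg]
        by_cases hgt : pvSumIf solucion valores + valores.getD i 0 > vA
        · rw [if_pos hgt, if_pos (And.intro hg hgt)]; rfl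
        · rw [if_neg hgt, if_neg (fun hc => hgt hc.2)]
      · rw [if_neg hg, if_neg (fun hc => hg hc.1)]
    · -- 1 - s is neither adding nor removing item i: sums unchanged
      have hw' : pvSumIf (solucion.set i (1 - solucion.getD i 0)) pesos
          = pvSumIf solucion pesos := by
        rw [pv_sumIf_set _ _ _ _ hi, if_neg h1, if_neg (by omega : ¬(1 - solucion.getD i 0 = 1))]
        ring
      have hv' : pvSumIf (solucion.set i (1 - solucion.getD i 0)) valores
          = pvSumIf solucion valores := by
        rw [pv_sumIf_set _ _ _ _ hi, if_neg h1, if_neg (by omega : ¬(1 - solucion.getD i 0 = 1))]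
        ring
      simp only [pvStepA, pvStepB, pvEvaluar]
      rw [hw', hv', if_neg h1, if_neg h0]
      simp only []
      by_cases hg : pvSumIf solucion pesos ≤ capacidad
      · rw [if_pos hg, if_pos hg]
        by_cases hgt : pvSumIf solucion valores > vA
        · rw [if_pos hgt, if_pos (And.intro hg hgt)]; rfl
        · rw [if_neg hgt, if_neg (fun hc => hgt hc.2)]
      · rw [if_neg hg, if_neg (fun hc => hg hc.1)]

theorem pv_main (solucion valores pesos : List Int) (capacidad : Int)
    (l : List Nat) (hl : ∀ j ∈ l, j < solucion.length) (vA : Int) (b : Option Nat) :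
    l.foldl (pvStepA solucion valores pesos capacidad) (pvRepr solucion b, vA)
      = (pvRepr solucion ((l.foldl (pvStepB solucion valores pesos capacidad) (b, vA)).1),
         (l.foldl (pvStepB solucion valores pesos capacidad) (b, vA)).2) := by
  induction l generalizing vA b with
  | nil => rfl
  | cons i t ih =>
    have hi : i < solucion.length := hl i List.mem_cons_self
    have hl' : ∀ j ∈ t, j < solucion.length := fun j hj => hl j (List.mem_cons_of_mem _ hj)
    rw [List.foldl_cons, List.foldl_cons, pv_step _ _ _ _ _ hi]
    have := ih hl' (pvStepB solucion valores pesos capacidad (b, vA) i).2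
      (pvStepB solucion valores pesos capacidad (b, vA) i).1
    simpa using this

-- ===== VERDICT (by name: the statement is the Claim_ definition above) =====
theorem busqueda_local_spec : Claim_equal_busqueda_local := by
  intro solucion valores pesos capacidad _ _
  unfold Spec_busqueda_local
  rw [pvA_eq, pvB_eq]
  have h0 : pvEvaluar solucion valores pesos capacidad
      = (if pvSumIf solucion pesos ≤ capacidad then pvSumIf solucion valores else 0) := rfl
  rw [h0]
  have hmain := pv_main solucion valores pesos capacidad (List.range solucion.length)
    (fun j hj => List.mem_range.mp hj)
    (if pvSumIf solucion pesos ≤ capacidad then pvSumIf solucion valores else 0) none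
  have hb : pvRepr solucion none = solucion := rfl
  rw [hb] at hmain
  rw [hmain]
  cases ((List.range solucion.length).foldl (pvStepB solucion valores pesos capacidad)
      (none, if pvSumIf solucion pesos ≤ capacidad then pvSumIf solucion valores else 0)).1 <;>
    rfl
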